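-- pv_equiv track=rewrite | github.com/ethandamian/Practica4_Enjambre | vlsm_calculator.py | calculate_usable_bits
-- ===== SOURCE A (Python) =====
-- def calculate_usable_bits(subnet):
--     """
--     Calcula la cantidad de bits usables para la creación de subredes.
--     """
--
--     number_of_hosts = subnet['hosts']
--     bits = 0
--     n = 2
--     while(True):
--         bits = 2**n
--         if bits > number_of_hosts:
--             return n
--         n += 1
-- ===== SOURCE B (Python) =====
-- def calculate_usable_bits(subnet):
--     """
--     Calcula la cantidad de bits usables para la creación de subredes.
--     """
--     number_of_hosts = subnet['hosts']
--     if number_of_hosts < 4: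
--         return 2
--     return number_of_hosts.bit_length()
-- ===== Notes on version B (the rewrite author's own statement) =====
-- stated objective: simpler
-- what changed: Replaces the growing-power while-loop with a closed form: return 2 for hosts < 4, else hosts.bit_length(), which is exactly the smallest n with 2^n > hosts.
import Mathlib
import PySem

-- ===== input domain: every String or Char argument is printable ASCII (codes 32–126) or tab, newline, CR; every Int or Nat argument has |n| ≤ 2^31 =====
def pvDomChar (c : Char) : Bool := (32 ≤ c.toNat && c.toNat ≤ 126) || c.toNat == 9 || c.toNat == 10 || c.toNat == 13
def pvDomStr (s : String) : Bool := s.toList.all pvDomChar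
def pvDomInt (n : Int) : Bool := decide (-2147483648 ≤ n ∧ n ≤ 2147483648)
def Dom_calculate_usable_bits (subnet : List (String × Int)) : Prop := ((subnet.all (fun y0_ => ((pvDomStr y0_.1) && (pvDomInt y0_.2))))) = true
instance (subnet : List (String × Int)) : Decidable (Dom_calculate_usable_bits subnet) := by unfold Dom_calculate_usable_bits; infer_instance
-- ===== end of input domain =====

-- B replaces A's growing-power while-loop by a closed form (2 for hosts < 4, else the
-- integer's binary bit length); objective: simpler.

-- ===== PORT A =====
-- the 'while True' loop: bits = 2**n; if bits > hosts: return n; n += 1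
def calcLoopA (hosts : Int) (n : Nat) : Int :=
  if (2 : Int) ^ n > hosts then (n : Int)
  else calcLoopA hosts (n + 1)
termination_by hosts.toNat + 1 - 2 ^ n
decreasing_by
  have h1 : (2 : Int) ^ n ≤ hosts := by omega
  have h2 : (2 : Nat) ^ n ≤ hosts.toNat := by
    have : ((2 : Nat) ^ n : Int) ≤ hosts := by push_cast; exact h1
    omega
  have h3 : (2 : Nat) ^ n < 2 ^ (n + 1) := by
    exact Nat.pow_lt_pow_right (by norm_num) (Nat.lt_succ_self n)
  omega

def calculate_usable_bits (subnet : List (String × Int)) : Int :=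
  match (PySem.Dict.mk subnet).get? "hosts" with
  | some number_of_hosts => calcLoopA number_of_hosts 2
  | none => 0   -- KeyError in Python; excluded by Pre_

-- ===== PORT B =====
def calculate_usable_bits_alt (subnet : List (String × Int)) : Int :=
  match (PySem.Dict.mk subnet).get? "hosts" with
  | some number_of_hosts =>
      if number_of_hosts < 4 then 2
      else (Nat.size number_of_hosts.toNat : Int)   -- int.bit_length() of a positive int
  | none => 0   -- KeyError in Python; excluded by Pre_

-- ===== PRECONDITION & SPEC =====
-- A raises KeyError when the key "hosts" is absent; Pre_ requires it to be present.
def Pre_calculate_usable_bits (subnet : List (String × Int)) : Prop :=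
  ((PySem.Dict.mk subnet).get? "hosts").isSome = true
instance (subnet : List (String × Int)) : Decidable (Pre_calculate_usable_bits subnet) := by
  unfold Pre_calculate_usable_bits; infer_instance

def pvWitness_calculate_usable_bits : (List (String × Int)) := [("hosts", 5)]

def Spec_calculate_usable_bits (subnet : List (String × Int)) (out : Int) : Prop := out = calculate_usable_bits_alt subnet
instance (subnet : List (String × Int)) (out : Int) : Decidable (Spec_calculate_usable_bits subnet out) := by unfold Spec_calculate_usable_bits; infer_instance

-- ===== CLAIM (what is proved, stated in full; the proofs are below) =====
def Claim_equal_calculate_usable_bits : Prop := ∀ (subnet : List (String × Int)), Dom_calculate_usable_bits subnet → Pre_calculate_usable_bits subnet → Spec_calculate_usable_bits subnet (calculate_usable_bits subnet)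

-- ===== LEMMAS AND PROOFS =====

-- on nonnegative input H, the loop started at any n ≤ size H returns size H
theorem calcLoopA_size (H : Nat) : ∀ k n, Nat.size H - n = k → n ≤ Nat.size H →
    calcLoopA (H : Int) n = (Nat.size H : Int) := by
  intro k
  induction k with
  | zero =>
      intro n hk hn
      have hEq : n = Nat.size H := by omega
      subst hEq
      have hlt : H < 2 ^ Nat.size H := Nat.lt_size_self H
      rw [calcLoopA]
      rw [if_pos (by exact_mod_cast hlt)]
  | succ k ih =>
      intro n hk hn
      have hlt : n < Nat.size H := by omega
      have hle : (2 : Nat) ^ n ≤ H := by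
        by_contra hcon
        push Not at hcon
        have := Nat.size_le.mpr hcon
        omega
      rw [calcLoopA]
      rw [if_neg (by exact_mod_cast not_lt.mpr hle)]
      exact ih (n + 1) (by omega) (by omega)

theorem calcLoopA_eq_closed (h : Int) :
    calcLoopA h 2 = (if h < 4 then 2 else (Nat.size h.toNat : Int)) := by
  by_cases h4 : h < 4
  · rw [calcLoopA, if_pos (by norm_num; omega), if_pos h4]; norm_num
  · rw [if_neg h4]
    have hH : ((h.toNat : Int)) = h := by omega
    have hge : 4 ≤ h.toNat := by omega
    have hsz : 3 ≤ Nat.size h.toNat := by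
      by_contra hcon
      have : h.toNat < 2 ^ 3 → Nat.size h.toNat ≤ 3 := fun hx => Nat.size_le.mpr hx
      have h2 : Nat.size h.toNat ≤ 2 := by omega
      have := Nat.size_le.mp h2
      omega
    calc calcLoopA h 2 = calcLoopA ((h.toNat : Nat) : Int) 2 := by rw [hH]
      _ = (Nat.size h.toNat : Int) := calcLoopA_size h.toNat _ 2 rfl (by omega)

-- ===== VERDICT (by name: the statement is the Claim_ definition above) =====
theorem calculate_usable_bits_spec : Claim_equal_calculate_usable_bits := by
  intro subnet _ hpre
  unfold Spec_calculate_usable_bits calculate_usable_bits calculate_usable_bits_alt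
  cases hg : (PySem.Dict.mk subnet).get? "hosts" with
  | none => rfl
  | some h => simpa using calcLoopA_eq_closed h
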